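-- pv_equiv track=rewrite | github.com/m-irrohas/AI-PoC-Agents | src/ai_poc_agents_v2/agents/poc_agent.py | _extract_deployment_instructions
-- ===== SOURCE A (Python) =====
-- def _extract_deployment_instructions(response: str) -> str:
--     """Extract deployment instructions from response."""
--     # Look for setup/installation sections
--     lines = response.split('\n')
--     instructions = []
--
--     capture = False
--     for line in lines:
--         if any(keyword in line.lower() for keyword in ["setup", "install", "deploy", "run"]):
--             capture = True
--         elif capture and line.strip() and not line.startswith('#'):
--             instructions.append(line)
--
--     return '\n'.join(instructions) if instructions else "See README.md for setup instructions"
-- ===== SOURCE B (Python) =====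
-- def _extract_deployment_instructions(response: str) -> str:
--     """Extract deployment instructions: find the first keyword line, then filter what follows."""
--     keywords = ("setup", "install", "deploy", "run")
--     lines = response.split('\n')
--     pivot = next((i for i, line in enumerate(lines)
--                   if any(k in line.lower() for k in keywords)), None)
--     if pivot is None:
--         return "See README.md for setup instructions"
--     kept = [line for line in lines[pivot + 1:]
--             if not any(k in line.lower() for k in keywords)
--             and line.strip() and not line.startswith('#')]
--     return '\n'.join(kept) if kept else "See README.md for setup instructions"
-- ===== Notes on version B (the rewrite author's own statement) =====
-- stated objective: alternative
-- what changed: Replaces the monotone capture-flag state machine with an index-then-filter decomposition: first find the index of the first keyword line, then filter the lines strictly after it.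
import Mathlib
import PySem

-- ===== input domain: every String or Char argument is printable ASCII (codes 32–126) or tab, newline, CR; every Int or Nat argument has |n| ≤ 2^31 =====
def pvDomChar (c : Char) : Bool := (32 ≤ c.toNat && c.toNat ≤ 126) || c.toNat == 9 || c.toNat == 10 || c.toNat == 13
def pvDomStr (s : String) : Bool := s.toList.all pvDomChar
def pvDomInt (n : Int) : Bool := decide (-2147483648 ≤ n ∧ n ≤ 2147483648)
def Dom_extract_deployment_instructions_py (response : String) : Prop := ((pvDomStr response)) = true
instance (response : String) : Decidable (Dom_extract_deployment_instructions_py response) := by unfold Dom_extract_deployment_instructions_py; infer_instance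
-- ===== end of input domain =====

-- B replaces A's capture-flag state machine by an index-then-filter decomposition (objective: alternative, same cost).

-- ===== PORT A =====
-- any(keyword in line.lower() for keyword in ["setup", "install", "deploy", "run"])
def pvKw (line : String) : Bool :=
  ["setup", "install", "deploy", "run"].any (fun k => PySem.Str.isIn k (PySem.Str.lower line))

def extract_deployment_instructions_py (response : String) : String :=
  let lines := (PySem.Str.split? response "\n").getD []  -- sep is the nonempty literal "\n", so split? is some
  let st := lines.foldl (fun (st : Bool × List String) line =>
    if pvKw line then (true, st.2)
    else if st.1 && !(PySem.Str.strip line == "") && !(PySem.Str.startswith line "#") then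
      (st.1, st.2 ++ [line])
    else st) (false, [])
  if st.2 ≠ [] then PySem.Str.join "\n" st.2 else "See README.md for setup instructions"

-- ===== PORT B =====
-- the 'next(... enumerate ...)' search: lines strictly after the first keyword line, none if there is no keyword line
def pvAfterKw : List String → Option (List String)
  | [] => none
  | l :: rest => if pvKw l then some rest else pvAfterKw rest

def extract_deployment_instructions_py_alt (response : String) : String :=
  let lines := (PySem.Str.split? response "\n").getD []  -- sep is the nonempty literal "\n", so split? is some
  match pvAfterKw lines with
  | none => "See README.md for setup instructions"
  | some rest =>
    let kept := rest.filter (fun line =>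
      !pvKw line && !(PySem.Str.strip line == "") && !(PySem.Str.startswith line "#"))
    if kept ≠ [] then PySem.Str.join "\n" kept else "See README.md for setup instructions"

-- ===== PRECONDITION & SPEC =====
def Spec_extract_deployment_instructions_py (response : String) (out : String) : Prop := out = extract_deployment_instructions_py_alt response
instance (response : String) (out : String) : Decidable (Spec_extract_deployment_instructions_py response out) := by unfold Spec_extract_deployment_instructions_py; infer_instance

-- ===== CLAIM (what is proved, stated in full; the proofs are below) =====
def Claim_equal_extract_deployment_instructions_py : Prop := ∀ (response : String), Dom_extract_deployment_instructions_py response → Spec_extract_deployment_instructions_py response (extract_deployment_instructions_py response)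

-- ===== LEMMAS AND PROOFS =====
-- A's loop step (definitionally the lambda inside port A)
def pvStep (st : Bool × List String) (line : String) : Bool × List String :=
  if pvKw line then (true, st.2)
  else if st.1 && !(PySem.Str.strip line == "") && !(PySem.Str.startswith line "#") then
    (st.1, st.2 ++ [line])
  else st

-- B's filter predicate (definitionally the lambda inside port B)
def pvKeep (line : String) : Bool :=
  !pvKw line && !(PySem.Str.strip line == "") && !(PySem.Str.startswith line "#")

-- once capture is true, A's loop appends exactly the pvKeep-filtered lines
theorem pvFoldTrue (lines : List String) (acc : List String) :
    lines.foldl pvStep (true, acc) = (true, acc ++ lines.filter pvKeep) := by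
  induction lines generalizing acc with
  | nil => simp
  | cons l rest ih =>
    by_cases hk : pvKw l <;>
      by_cases hc : (!(PySem.Str.strip l == "") && !(PySem.Str.startswith l "#")) = true <;>
      simp at hc ⊢ <;> simp_all [pvStep, pvKeep]
    have hne : ¬(¬PySem.Str.strip l = "" ∧ PySem.Chars.startswith l.toList ['#'] = false) :=
      fun h => absurd (hc h.1) (by simp [h.2])
    rw [if_neg hne]
    exact ih acc

-- while capture is false, A's loop skips until the first keyword line
theorem pvFoldFalse (lines : List String) :
    lines.foldl pvStep (false, []) =
      match pvAfterKw lines with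
      | none => (false, [])
      | some rest => (true, rest.filter pvKeep) := by
  induction lines with
  | nil => simp [pvAfterKw]
  | cons l rest ih =>
    by_cases hk : pvKw l
    · simp [pvAfterKw, pvStep, hk, pvFoldTrue]
    · simp [pvAfterKw, pvStep, hk, ih]

-- ===== VERDICT (by name: the statement is the Claim_ definition above) =====
theorem extract_deployment_instructions_py_spec : Claim_equal_extract_deployment_instructions_py := by
  intro response _
  show extract_deployment_instructions_py response = extract_deployment_instructions_py_alt response
  unfold extract_deployment_instructions_py extract_deployment_instructions_py_alt
  have h : ((PySem.Str.split? response "\n").getD []).foldl (fun (st : Bool × List String) line =>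
      if pvKw line then (true, st.2)
      else if st.1 && !(PySem.Str.strip line == "") && !(PySem.Str.startswith line "#") then
        (st.1, st.2 ++ [line])
      else st) (false, []) = ((PySem.Str.split? response "\n").getD []).foldl pvStep (false, []) := rfl
  simp only [h, pvFoldFalse]
  cases hp : pvAfterKw ((PySem.Str.split? response "\n").getD []) with
  | none => simp
  | some rest => rfl
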